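-- pv_equiv track=rewrite | github.com/wzygxr/shuati | class170_SqrtDecomposition/Code40_LeetCode2439_Python.py | _canMinimize
-- ===== SOURCE A (Python) =====
-- from typing import List
--
-- def _canMinimize(nums: List[int], max_value: int) -> bool:
--     """
--     检查是否可以通过调整使得所有元素都不超过maxValue
--
--     Args:
--         nums: 输入数组
--         max_value: 最大允许值
--
--     Returns:
--         bool: 是否可以调整
--     """
--     extra = 0
--     for i in range(len(nums) - 1, -1, -1):
--         current = nums[i] + extra
--         if current > max_value:
--             extra = current - max_value
--         else:
--             extra = 0
--     return extra == 0
-- ===== SOURCE B (Python) =====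
-- from typing import List
--
-- def _canMinimize(nums: List[int], max_value: int) -> bool:
--     s = 0
--     for i, x in enumerate(nums):
--         s += x
--         if s > max_value * (i + 1):
--             return False
--     return True
-- ===== Notes on version B (the rewrite author's own statement) =====
-- stated objective: idiomatic
-- what changed: Replaced A's backward clipped-carry loop (propagating excess leftward and testing the leftover) by the standard forward prefix-sum feasibility test: running sum s over the first i+1 elements must satisfy s <= max_value*(i+1), with early exit.
import Mathlib
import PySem

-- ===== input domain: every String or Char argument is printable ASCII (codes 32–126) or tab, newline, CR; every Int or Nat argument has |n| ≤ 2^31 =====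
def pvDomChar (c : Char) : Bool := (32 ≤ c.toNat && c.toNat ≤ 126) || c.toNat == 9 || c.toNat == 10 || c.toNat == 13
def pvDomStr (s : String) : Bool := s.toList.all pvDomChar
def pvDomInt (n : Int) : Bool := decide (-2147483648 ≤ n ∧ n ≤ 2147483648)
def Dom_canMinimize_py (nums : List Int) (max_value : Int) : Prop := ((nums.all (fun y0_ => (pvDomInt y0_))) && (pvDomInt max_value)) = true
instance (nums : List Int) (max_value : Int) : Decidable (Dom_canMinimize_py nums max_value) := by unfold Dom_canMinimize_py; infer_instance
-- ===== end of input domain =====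

-- B replaces A's backward clipped-carry loop by a forward prefix-sum feasibility test
-- (sum of first i+1 elements ≤ max_value*(i+1), with early exit); return value only, no mutation.

-- ===== PORT A =====
-- A's loop runs i from len-1 down to 0 carrying `extra`; that right-to-left traversal of
-- nums with the same state update is exactly a foldr over nums.
def canMinimize_py (nums : List Int) (max_value : Int) : Bool :=
  (nums.foldr
    (fun x extra =>
      let current := x + extra
      if current > max_value then current - max_value else 0)
    0) == 0

-- ===== PORT B =====
-- Source B's forward loop: running sum s, position i; early return False when s > max_value*(i+1).
def canMinAltGo (max_value : Int) : List Int → Int → Nat → Bool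
  | [], _, _ => true
  | x :: rest, s, i =>
    let s' := s + x
    if s' > max_value * ((i : Int) + 1) then false
    else canMinAltGo max_value rest s' (i + 1)

def canMinimize_py_alt (nums : List Int) (max_value : Int) : Bool :=
  canMinAltGo max_value nums 0 0

-- ===== PRECONDITION & SPEC =====
def Spec_canMinimize_py (nums : List Int) (max_value : Int) (out : Bool) : Prop := out = canMinimize_py_alt nums max_value
instance (nums : List Int) (max_value : Int) (out : Bool) : Decidable (Spec_canMinimize_py nums max_value out) := by unfold Spec_canMinimize_py; infer_instance

-- ===== CLAIM (what is proved, stated in full; the proofs are below) =====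
def Claim_equal_canMinimize_py : Prop := ∀ (nums : List Int) (max_value : Int), Dom_canMinimize_py nums max_value → Spec_canMinimize_py nums max_value (canMinimize_py nums max_value)

-- ===== LEMMAS AND PROOFS =====

-- A's accumulator as a function of the (suffix) list
def fA (m : Int) (l : List Int) : Int :=
  l.foldr (fun x extra =>
      let current := x + extra
      if current > m then current - m else 0) 0

theorem fA_nonneg (m : Int) (l : List Int) : 0 ≤ fA m l := by
  induction l with
  | nil => simp [fA]
  | cons x t ih =>
    simp only [fA, List.foldr] at *
    split <;> omega

theorem fA_ge (m : Int) (l : List Int) :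
    ∀ k : Nat, k ≤ l.length → (l.take k).sum - m * k ≤ fA m l := by
  induction l with
  | nil =>
    intro k hk
    have hk0 : k = 0 := by simpa using hk
    subst hk0; simp [fA]
  | cons x t ih =>
    intro k hk
    cases k with
    | zero => simpa using fA_nonneg m (x :: t)
    | succ j =>
      have hj : j ≤ t.length := by simpa using hk
      have := ih j hj
      simp only [fA, List.foldr, List.take, List.sum_cons] at *
      split <;> push_cast at * <;> nlinarith [fA_nonneg m t]

theorem fA_pos_ex (m : Int) (l : List Int) (h : 0 < fA m l) :
    ∃ k : Nat, 1 ≤ k ∧ k ≤ l.length ∧ fA m l = (l.take k).sum - m * k := by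
  induction l with
  | nil => simp [fA] at h
  | cons x t ih =>
    have hnn := fA_nonneg m t
    by_cases hp : 0 < fA m t
    · obtain ⟨k, hk1, hk2, hk3⟩ := ih hp
      refine ⟨k + 1, by omega, by simpa using Nat.succ_le_succ hk2, ?_⟩
      simp only [fA, List.foldr, List.take, List.sum_cons] at *
      have hm : m * ((k : Int) + 1) = m * k + m := by ring
      split at h
      · push_cast; omega
      · omega
    · have hz : fA m t = 0 := by omega
      refine ⟨1, le_refl 1, by simp, ?_⟩
      simp only [fA, List.foldr, List.take, List.sum_cons] at *
      split at h <;> simp_all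

theorem fA_zero_iff (m : Int) (l : List Int) :
    fA m l = 0 ↔ ∀ k : Nat, 1 ≤ k → k ≤ l.length → (l.take k).sum ≤ m * k := by
  constructor
  · intro h0 k _ hk
    have := fA_ge m l k hk
    omega
  · intro hall
    by_contra hne
    have hpos : 0 < fA m l := lt_of_le_of_ne (fA_nonneg m l) (Ne.symm hne)
    obtain ⟨k, hk1, hk2, hk3⟩ := fA_pos_ex m l hpos
    have := hall k hk1 hk2
    omega

theorem altGo_iff (m : Int) (l : List Int) :
    ∀ (s : Int) (i : Nat),
      canMinAltGo m l s i = true ↔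
        ∀ k : Nat, 1 ≤ k → k ≤ l.length → s + (l.take k).sum ≤ m * ((i : Int) + k) := by
  induction l with
  | nil =>
    intro s i
    simp only [canMinAltGo]
    constructor
    · intro _ k hk1 hk2
      simp at hk2; omega
    · intro _; trivial
  | cons x t ih =>
    intro s i
    simp only [canMinAltGo]
    split
    · rename_i hgt
      simp only [Bool.false_eq_true, false_iff]
      intro hall
      have h1 := hall 1 (by norm_num) (by simp)
      simp only [List.take, List.sum_cons, List.sum_nil] at h1
      push_cast at h1; omega
    · rename_i hle
      push Not at hle
      rw [ih (s + x) (i + 1)]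
      constructor
      · intro h k hk1 hk2
        cases k with
        | zero => omega
        | succ j =>
          cases Nat.eq_zero_or_pos j with
          | inl hj0 =>
            subst hj0
            simp only [List.take, List.sum_cons, List.sum_nil]
            push_cast; omega
          | inr hjpos =>
            have hj : j ≤ t.length := by simpa using hk2
            have := h j hjpos hj
            simp only [List.take, List.sum_cons]
            have hm : m * ((i : Int) + 1 + j) = m * ((i : Int) + ((j : Int) + 1)) := by ring
            push_cast at *; omega
      · intro h j hj1 hj2
        have := h (j + 1) (by omega) (by simpa using Nat.succ_le_succ hj2)
        simp only [List.take, List.sum_cons] at this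
        have hm : m * ((i : Int) + 1 + j) = m * ((i : Int) + ((j : Int) + 1)) := by ring
        push_cast at *; omega

-- ===== VERDICT (by name: the statement is the Claim_ definition above) =====
theorem canMinimize_py_spec : Claim_equal_canMinimize_py := by
  intro nums m _
  unfold Spec_canMinimize_py canMinimize_py canMinimize_py_alt
  have key : fA m nums = 0 ↔ canMinAltGo m nums 0 0 = true := by
    rw [fA_zero_iff, altGo_iff]
    constructor
    · intro h k hk1 hk2
      have := h k hk1 hk2
      have hm : m * (((0 : Nat) : Int) + (k : Int)) = m * k := by push_cast; ring
      omega
    · intro h k hk1 hk2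
      have := h k hk1 hk2
      have hm : m * (((0 : Nat) : Int) + (k : Int)) = m * k := by push_cast; ring
      omega
  show (fA m nums == 0) = canMinAltGo m nums 0 0
  by_cases hz : fA m nums = 0
  · simp [hz, key.mp hz]
  · have h2 : canMinAltGo m nums 0 0 = false := by
      cases h : canMinAltGo m nums 0 0
      · rfl
      · exact absurd (key.mpr h) hz
    simp [hz, h2]
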